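-- pv_equiv track=rewrite | github.com/qinghua-liu/AxiomSelectionEvaluation | update_pruney/process.py | remove_supersets
-- ===== SOURCE A (Python) =====
-- def remove_supersets(sets_list):
--
--     sets_clean = []
--     N = len(sets_list)
--     for i1 in range(N):
--         for i2 in range(N):
--             if sets_list[i1] > sets_list[i2]:
--                 break
--         else:
--             sets_clean.append(sets_list[i1])
--     return sets_clean
-- ===== SOURCE B (Python) =====
-- def remove_supersets(sets_list):
--     # Sort indices by set size ascending; while scanning, `seen` holds every
--     # already-processed set of STRICTLY smaller size (flushed group by group),
--     # so s must be dropped iff some member of `seen` is a subset of s.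
--     n = len(sets_list)
--     order = sorted(range(n), key=lambda i: len(sets_list[i]))
--     keep = [True] * n
--     seen = []    # processed sets of size strictly below `cur`
--     group = []   # processed sets of size exactly `cur`
--     cur = -1
--     for i in order:
--         s = sets_list[i]
--         if len(s) != cur:
--             seen = seen + group
--             group = []
--             cur = len(s)
--         if any(t <= s for t in seen):
--             keep[i] = False
--         group = group + [s]
--     return [s for k, s in zip(keep, sets_list) if k]
-- ===== Notes on version B (the rewrite author's own statement) =====
-- stated objective: alternative
-- what changed: Instead of A's all-pairs proper-superset scan, B sorts the indices by set size and sweeps them once, flushing each finished size group into a 'seen' pool so every set is tested only against accumulated strictly smaller sets, then emits kept sets in input order.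
import Mathlib
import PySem

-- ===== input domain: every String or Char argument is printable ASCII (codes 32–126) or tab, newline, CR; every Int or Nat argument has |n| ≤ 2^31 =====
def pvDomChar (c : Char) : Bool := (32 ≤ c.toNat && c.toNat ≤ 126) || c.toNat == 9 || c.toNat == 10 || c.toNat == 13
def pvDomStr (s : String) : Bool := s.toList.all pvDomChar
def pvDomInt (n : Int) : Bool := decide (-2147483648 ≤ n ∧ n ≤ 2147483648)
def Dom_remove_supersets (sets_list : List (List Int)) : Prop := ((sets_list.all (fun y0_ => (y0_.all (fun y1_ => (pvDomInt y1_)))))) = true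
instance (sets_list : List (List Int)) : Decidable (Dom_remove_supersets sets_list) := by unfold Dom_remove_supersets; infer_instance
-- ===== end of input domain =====

-- B sorts indices by set size and tests each set only against the accumulated strictly
-- smaller sets, instead of A's all-pairs proper-superset scan (objective: alternative).

-- ===== PORT A =====
-- literal port of A: for i1 in range(N): for i2 in range(N): if sets_list[i1] > sets_list[i2]: break
-- else: append.  's1 > s2' on Python sets is proper superset: issuperset s1 s2 and not s1 == s2.
def remove_supersets (sets_list : List (List Int)) : List (List Int) :=
  let N : Int := sets_list.length
  (PySem.List.pyRange 0 N 1).foldl (fun sets_clean i1 =>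
    if (PySem.List.pyRange 0 N 1).any (fun i2 =>
        PySem.Set.issuperset (PySem.List.pyGetD sets_list i1 []) (PySem.List.pyGetD sets_list i2 [])
        && !(PySem.Set.equal (PySem.List.pyGetD sets_list i1 []) (PySem.List.pyGetD sets_list i2 [])))
    then sets_clean
    else sets_clean ++ [PySem.List.pyGetD sets_list i1 []]) []

-- ===== PORT B =====
-- literal port of Source B: indices sorted by set size; fold carrying (keep, seen, group, cur);
-- flush `group` into `seen` when the size changes; drop i iff some strictly smaller seen set
-- is a subset; finally keep the flagged elements in input order.
def remove_supersets_alt (sets_list : List (List Int)) : List (List Int) :=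
  let n := sets_list.length
  let order := PySem.List.sorted (PySem.List.pyRange 0 (n : Int) 1)
      (fun i => ((PySem.List.pyGetD sets_list i []).length : Int)) false
  let st := order.foldl (fun st i =>
      let s := PySem.List.pyGetD sets_list i []
      let seen' := if (s.length : Int) ≠ st.2.2.2 then st.2.1 ++ st.2.2.1 else st.2.1
      let group' := if (s.length : Int) ≠ st.2.2.2 then ([] : List (List Int)) else st.2.2.1
      let cur' := if (s.length : Int) ≠ st.2.2.2 then (s.length : Int) else st.2.2.2
      let keep' := if seen'.any (fun t => PySem.Set.issubset t s)
                   then PySem.List.pySetD st.1 i false else st.1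
      (keep', seen', group' ++ [s], cur'))
    ((List.replicate n true, ([], [], -1)) :
      List Bool × List (List Int) × List (List Int) × Int)
  ((st.1.zip sets_list).filter (fun p => p.1)).map (fun p => p.2)

-- ===== PRECONDITION & SPEC =====
-- Pre_ only pins the set REPRESENTATION: each inner list holds the distinct elements of a
-- Python set, so it excludes no input the Python function actually receives.
def Pre_remove_supersets (sets_list : List (List Int)) : Prop := ∀ s ∈ sets_list, s.Nodup
instance (sets_list : List (List Int)) : Decidable (Pre_remove_supersets sets_list) := by unfold Pre_remove_supersets; infer_instance
def pvWitness_remove_supersets : List (List Int) := [[1, 2], [3], [1]]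
def Spec_remove_supersets (sets_list : List (List Int)) (out : List (List Int)) : Prop := out = remove_supersets_alt sets_list
instance (sets_list : List (List Int)) (out : List (List Int)) : Decidable (Spec_remove_supersets sets_list out) := by unfold Spec_remove_supersets; infer_instance

-- ===== CLAIM (what is proved, stated in full; the proofs are below) =====
def Claim_equal_remove_supersets : Prop := ∀ (sets_list : List (List Int)), Dom_remove_supersets sets_list → Pre_remove_supersets sets_list → Spec_remove_supersets sets_list (remove_supersets sets_list)

-- ===== LEMMAS AND PROOFS =====

/-- `sets_list[j]` (total form). -/
def elemAt (l : List (List Int)) (j : Int) : List Int := PySem.List.pyGetD l j []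

/-- size of `sets_list[j]` as an `Int`. -/
def klen (l : List (List Int)) (j : Int) : Int := ((elemAt l j).length : Int)

/-- some set in `l` is strictly smaller than `s` and a subset of `s`. -/
def badB (l : List (List Int)) (s : List Int) : Bool :=
  l.any (fun t => decide ((t.length : Int) < (s.length : Int)) && PySem.Set.issubset t s)

/-- the sorted index order B iterates in. -/
def ordOf (l : List (List Int)) : List Int :=
  PySem.List.sorted (PySem.List.pyRange 0 (l.length : Int) 1)
    (fun i => ((PySem.List.pyGetD l i []).length : Int)) false

/-- B's loop body. -/
def stepB (l : List (List Int))
    (st : List Bool × List (List Int) × List (List Int) × Int) (i : Int) :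
    List Bool × List (List Int) × List (List Int) × Int :=
  let s := PySem.List.pyGetD l i []
  let seen' := if (s.length : Int) ≠ st.2.2.2 then st.2.1 ++ st.2.2.1 else st.2.1
  let group' := if (s.length : Int) ≠ st.2.2.2 then ([] : List (List Int)) else st.2.2.1
  let cur' := if (s.length : Int) ≠ st.2.2.2 then (s.length : Int) else st.2.2.2
  let keep' := if seen'.any (fun t => PySem.Set.issubset t s)
               then PySem.List.pySetD st.1 i false else st.1
  (keep', seen', group' ++ [s], cur')

theorem alt_eq_fold (l : List (List Int)) :
    remove_supersets_alt l =
      ((((ordOf l).foldl (stepB l)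
          (List.replicate l.length true, ([], [], -1))).1.zip l).filter
            (fun p => p.1)).map (fun p => p.2) := rfl

/-- loop invariant for B's fold, after processing the prefix `pre` of `ordOf l`. -/
def InvB (l : List (List Int)) (pre : List Int)
    (st : List Bool × List (List Int) × List (List Int) × Int) : Prop :=
  st.1.length = l.length
  ∧ (∀ k : Nat, k < l.length →
      PySem.List.pyGetD st.1 (k : Int) true
        = !(decide ((k : Int) ∈ pre) && badB l (elemAt l (k : Int))))
  ∧ (∀ t, t ∈ st.2.1 ↔ ∃ j ∈ pre, klen l j < st.2.2.2 ∧ t = elemAt l j)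
  ∧ (∀ t, t ∈ st.2.2.1 ↔ ∃ j ∈ pre, klen l j = st.2.2.2 ∧ t = elemAt l j)
  ∧ (∀ j ∈ pre, klen l j ≤ st.2.2.2)
  ∧ (st.2.2.2 = -1 ∨ ∃ j ∈ pre, klen l j = st.2.2.2)

theorem ordOf_mem (l : List (List Int)) (j : Int) :
    j ∈ ordOf l ↔ 0 ≤ j ∧ j < (l.length : Int) := by
  unfold ordOf
  rw [PySem.List.mem_sorted, PySem.List.mem_pyRange_one]

theorem ordOf_nodup (l : List (List Int)) : (ordOf l).Nodup := by
  unfold ordOf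
  exact ((PySem.List.sorted_perm _ _ _).nodup_iff).mpr (PySem.List.nodup_pyRange_one _ _)

theorem ordOf_pairwise (l : List (List Int)) :
    (ordOf l).Pairwise (fun a b => klen l a ≤ klen l b) := by
  unfold ordOf klen elemAt
  exact PySem.List.sorted_pairwise _ _

theorem elemAt_mem (l : List (List Int)) (j : Int) (h0 : 0 ≤ j) (h1 : j < (l.length : Int)) :
    elemAt l j ∈ l := by
  unfold elemAt
  apply PySem.List.pyGetD_mem
  unfold PySem.Raise.InRange
  omega

theorem badB_iff (l : List (List Int)) (s : List Int) :
    badB l s = true ↔ ∃ t ∈ l, (t.length : Int) < (s.length : Int) ∧ ∀ x ∈ t, x ∈ s := by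
  unfold badB
  simp [List.any_eq_true, PySem.Set.issubset_iff]


theorem inv_core (l : List (List Int)) (pre : List Int) (i : Int)
    (keep : List Bool) (seen' group' : List (List Int))
    (hi0 : 0 ≤ i) (hi1 : i < (l.length : Int))
    (hipre : i ∉ pre)
    (hpreb : ∀ j ∈ pre, 0 ≤ j ∧ j < (l.length : Int))
    (h1 : keep.length = l.length)
    (h2 : ∀ k : Nat, k < l.length →
      PySem.List.pyGetD keep (k : Int) true
        = !(decide ((k : Int) ∈ pre) && badB l (elemAt l (k : Int))))
    (hseen : ∀ t, t ∈ seen' ↔ ∃ j ∈ pre, klen l j < klen l i ∧ t = elemAt l j)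
    (hgroup : ∀ t, t ∈ group' ↔ ∃ j ∈ pre, klen l j = klen l i ∧ t = elemAt l j)
    (hall : ∀ j ∈ pre, klen l j ≤ klen l i)
    (hcomplete : ∀ j : Int, 0 ≤ j → j < (l.length : Int) → klen l j < klen l i → j ∈ pre) :
    InvB l (pre ++ [i])
      ((if seen'.any (fun t => PySem.Set.issubset t (PySem.List.pyGetD l i []))
          then PySem.List.pySetD keep i false else keep),
       seen', group' ++ [PySem.List.pyGetD l i []], klen l i) := by
  have hsdef : elemAt l i = PySem.List.pyGetD l i [] := rfl
  have hcond : (seen'.any (fun t => PySem.Set.issubset t (PySem.List.pyGetD l i [])))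
      = badB l (elemAt l i) := by
    rw [Bool.eq_iff_iff, List.any_eq_true]
    constructor
    · rintro ⟨t, ht, hsub⟩
      rw [hseen] at ht
      obtain ⟨j, hj, hlt, rfl⟩ := ht
      obtain ⟨hj0, hj1⟩ := hpreb j hj
      rw [badB_iff]
      refine ⟨elemAt l j, elemAt_mem l j hj0 hj1, ?_, ?_⟩
      · exact hlt
      · rw [← PySem.Set.issubset_iff]
        exact hsub
    · intro hb
      rw [badB_iff] at hb
      obtain ⟨t, htl, hlen, hsub⟩ := hb
      obtain ⟨k, hk, rfl⟩ := List.mem_iff_getElem.mp htl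
      have hek : elemAt l (k : Int) = l[k] := PySem.List.pyGetD_ofNat l k [] hk
      have hklt : klen l (k : Int) < klen l i := by
        unfold klen
        rw [hek, hsdef]
        exact_mod_cast hlen
      have hkpre : (k : Int) ∈ pre :=
        hcomplete (k : Int) (by positivity) (by exact_mod_cast hk) hklt
      refine ⟨l[k], ?_, ?_⟩
      · rw [hseen]
        exact ⟨(k : Int), hkpre, hklt, hek.symm⟩
      · rw [PySem.Set.issubset_iff]
        exact hsub
  have hi' : i = ((i.toNat : Nat) : Int) := (Int.toNat_of_nonneg hi0).symm
  have hitn : i.toNat < keep.length := by omega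
  refine ⟨?_, ?_, ?_, ?_, ?_, ?_⟩
  · -- length
    by_cases hc : (seen'.any (fun t => PySem.Set.issubset t (PySem.List.pyGetD l i []))) = true
    · simp only [hc, if_pos]
      rw [PySem.List.length_pySetD, h1]
    · simp only [hc]
      simpa using h1
  · -- keep characterization
    intro k hk
    dsimp only
    by_cases hcb : badB l (elemAt l i) = true
    · rw [hcond.trans hcb, if_pos rfl,
        show PySem.List.pySetD keep i false = PySem.List.pySetD keep ((i.toNat : Nat) : Int) false by rw [← hi']]
      rw [PySem.List.pyGetD_pySetD_natCast keep i.toNat k false true hitn]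
      by_cases hki : k = i.toNat
      · have hk_i : ((k : Nat) : Int) = i := by omega
        rw [if_pos hki, hk_i]
        simp [List.mem_append, hcb]
      · have hk_i : ((k : Nat) : Int) ≠ i := by omega
        rw [if_neg hki, h2 k hk,
          (decide_eq_decide).mpr (show ((k : Int) ∈ pre ++ [i]) ↔ ((k : Int) ∈ pre) by
            simp [List.mem_append, hk_i])]
    · have hcb' : badB l (elemAt l i) = false := by
        cases h : badB l (elemAt l i)
        · rfl
        · exact absurd h hcb
      rw [hcond.trans hcb', if_neg (by simp), h2 k hk]
      by_cases hk_i : ((k : Nat) : Int) = i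
      · rw [hk_i]
        simp [hcb', hipre]
      · rw [(decide_eq_decide).mpr (show ((k : Int) ∈ pre ++ [i]) ↔ ((k : Int) ∈ pre) by
            simp [List.mem_append, hk_i])]
  · -- seen
    intro t
    rw [hseen]
    constructor
    · rintro ⟨j, hj, hlt, rfl⟩
      exact ⟨j, List.mem_append_left _ hj, hlt, rfl⟩
    · rintro ⟨j, hj, hlt, rfl⟩
      rcases List.mem_append.mp hj with hj | hj
      · exact ⟨j, hj, hlt, rfl⟩
      · simp at hj
        subst hj
        dsimp only at hlt
        omega
  · -- group
    intro t
    rw [List.mem_append]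
    constructor
    · rintro (ht | ht)
      · obtain ⟨j, hj, he, rfl⟩ := (hgroup t).mp ht
        exact ⟨j, List.mem_append_left _ hj, he, rfl⟩
      · simp at ht
        subst ht
        exact ⟨i, List.mem_append_right _ (List.mem_singleton_self i), rfl, hsdef.symm⟩
    · rintro ⟨j, hj, he, rfl⟩
      rcases List.mem_append.mp hj with hj | hj
      · exact Or.inl ((hgroup _).mpr ⟨j, hj, he, rfl⟩)
      · simp at hj
        subst hj
        exact Or.inr (by simp [hsdef])
  · -- bound
    intro j hj
    rcases List.mem_append.mp hj with hj | hj
    · exact hall j hj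
    · simp at hj
      subst hj
      exact le_refl _
  · -- achieved
    exact Or.inr ⟨i, List.mem_append_right _ (List.mem_singleton_self i), rfl⟩

theorem inv_step (l : List (List Int)) (pre rest : List Int) (i : Int)
    (st : List Bool × List (List Int) × List (List Int) × Int)
    (horder : ordOf l = pre ++ i :: rest) (hinv : InvB l pre st) :
    InvB l (pre ++ [i]) (stepB l st i) := by
  obtain ⟨keep, seen, group, cur⟩ := st
  obtain ⟨h1, h2, h3, h4, h5, h6⟩ := hinv
  dsimp only at h1 h2 h3 h4 h5 h6
  have hiord : i ∈ ordOf l := by rw [horder]; simp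
  obtain ⟨hi0, hi1⟩ := (ordOf_mem l i).mp hiord
  have hnd := ordOf_nodup l
  rw [horder] at hnd
  have hipre : i ∉ pre := by
    intro h
    exact (List.nodup_append.mp hnd).2.2 i h i (List.mem_cons_self ..) rfl
  have hpreb : ∀ j ∈ pre, 0 ≤ j ∧ j < (l.length : Int) := by
    intro j hj
    exact (ordOf_mem l j).mp (by rw [horder]; exact List.mem_append_left _ hj)
  have hpair := ordOf_pairwise l
  rw [horder] at hpair
  have hpa := List.pairwise_append.mp hpair
  have hple : ∀ j ∈ pre, klen l j ≤ klen l i := fun j hj => hpa.2.2 j hj i (List.mem_cons_self ..)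
  have hrest : ∀ j ∈ rest, klen l i ≤ klen l j := fun j hj => (List.pairwise_cons.mp hpa.2.1).1 j hj
  have hcomplete : ∀ j : Int, 0 ≤ j → j < (l.length : Int) → klen l j < klen l i → j ∈ pre := by
    intro j hj0 hj1 hjlt
    have hjord : j ∈ ordOf l := (ordOf_mem l j).mpr ⟨hj0, hj1⟩
    rw [horder] at hjord
    rcases List.mem_append.mp hjord with h | h
    · exact h
    · rcases List.mem_cons.mp h with h | h
      · subst h; omega
      · exact absurd hjlt (not_lt.mpr (hrest j h))
  have hkl : klen l i = ((PySem.List.pyGetD l i []).length : Int) := rfl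
  by_cases hfl : ((PySem.List.pyGetD l i []).length : Int) ≠ cur
  · have hcurlt : cur < klen l i := by
      rcases h6 with hc | ⟨j0, hj0, hj0e⟩
      · have : (0:Int) ≤ klen l i := by unfold klen; positivity
        omega
      · have := hple j0 hj0
        omega
    have hstep : stepB l (keep, seen, group, cur) i =
        ((if (seen ++ group).any (fun t => PySem.Set.issubset t (PySem.List.pyGetD l i []))
            then PySem.List.pySetD keep i false else keep),
         seen ++ group, [] ++ [PySem.List.pyGetD l i []], klen l i) := by
      simp [stepB, hfl, klen, elemAt]
    rw [hstep]
    refine inv_core l pre i keep (seen ++ group) [] hi0 hi1 hipre hpreb h1 h2 ?_ ?_ hple hcomplete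
    · intro t
      rw [List.mem_append]
      constructor
      · rintro (ht | ht)
        · obtain ⟨j, hj, hlt, rfl⟩ := (h3 t).mp ht
          exact ⟨j, hj, by omega, rfl⟩
        · obtain ⟨j, hj, he, rfl⟩ := (h4 t).mp ht
          exact ⟨j, hj, by omega, rfl⟩
      · rintro ⟨j, hj, hlt, rfl⟩
        have hle := h5 j hj
        rcases lt_or_eq_of_le hle with h | h
        · exact Or.inl ((h3 _).mpr ⟨j, hj, h, rfl⟩)
        · exact Or.inr ((h4 _).mpr ⟨j, hj, h, rfl⟩)
    · intro t
      simp only [List.not_mem_nil, false_iff]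
      rintro ⟨j, hj, he, rfl⟩
      have := h5 j hj
      omega
  · replace hfl := not_not.mp hfl
    have hflk : klen l i = cur := by rw [hkl]; exact hfl
    subst hflk
    have hnn : ¬(((PySem.List.pyGetD l i []).length : Int) ≠ klen l i) := by
      rw [hkl]
      exact fun h => h rfl
    have hstep : stepB l (keep, seen, group, klen l i) i =
        ((if seen.any (fun t => PySem.Set.issubset t (PySem.List.pyGetD l i []))
            then PySem.List.pySetD keep i false else keep),
         seen, group ++ [PySem.List.pyGetD l i []], klen l i) := by
      simp only [stepB]
      rw [if_neg hnn, if_neg hnn, if_neg hnn]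
    rw [hstep]
    exact inv_core l pre i keep seen group hi0 hi1 hipre hpreb h1 h2 h3 h4 h5 hcomplete

theorem inv_fold (l : List (List Int)) :
    ∀ (rest pre : List Int)
      (st : List Bool × List (List Int) × List (List Int) × Int),
      ordOf l = pre ++ rest → InvB l pre st → InvB l (ordOf l) (rest.foldl (stepB l) st) := by
  intro rest
  induction rest with
  | nil =>
    intro pre st h hinv
    rw [List.foldl_nil, h, List.append_nil]
    exact hinv
  | cons r rs ih =>
    intro pre st h hinv
    rw [List.foldl_cons]
    exact ih (pre ++ [r]) (stepB l st r) (by rw [h]; simp)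
      (inv_step l pre rs r st h hinv)

theorem keep_final (l : List (List Int)) :
    ((ordOf l).foldl (stepB l) (List.replicate l.length true, ([], [], -1))).1
      = l.map (fun s => !badB l s) := by
  have hinit : InvB l [] (List.replicate l.length true, ([], [], -1)) := by
    refine ⟨by simp, ?_, by simp, by simp, by simp, Or.inl rfl⟩
    intro k hk
    dsimp only
    rw [PySem.List.pyGetD_ofNat _ k true (by simpa using hk)]
    simp
  have hinv := inv_fold l (ordOf l) [] (List.replicate l.length true, ([], [], -1))
    (by simp) hinit
  obtain ⟨h1, h2, _⟩ := hinv
  apply List.ext_getElem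
  · rw [h1]; simp
  · intro k hk1 hk2
    have hk : k < l.length := by rw [h1] at hk1; exact hk1
    have hh := h2 k hk
    rw [PySem.List.pyGetD_ofNat _ k true (by omega)] at hh
    have hmem : (k : Int) ∈ ordOf l :=
      (ordOf_mem l k).mpr ⟨by positivity, by exact_mod_cast hk⟩
    have hel : elemAt l (k : Int) = l[k] := PySem.List.pyGetD_ofNat l k [] hk
    rw [hh, List.getElem_map]
    simp [hmem, hel]

theorem zip_map_filter (p : List Int → Bool) (l : List (List Int)) :
    (((l.map p).zip l).filter (fun q => q.1)).map (fun q => q.2) = l.filter p := by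
  induction l with
  | nil => rfl
  | cons x xs ih =>
    by_cases h : p x = true <;> simp [h, ih]

theorem alt_eq_filter (l : List (List Int)) :
    remove_supersets_alt l = l.filter (fun s => !badB l s) := by
  rw [alt_eq_fold, keep_final, zip_map_filter]

theorem any_pyRange_pyGetD (xs : List (List Int)) (p : List Int → Bool) :
    (PySem.List.pyRange 0 (xs.length : Int) 1).any
      (fun j => p (PySem.List.pyGetD xs j [])) = xs.any p := by
  conv_rhs => rw [← PySem.List.map_pyGetD_pyRange_zero' xs []]
  rw [List.any_map]
  rfl

theorem remove_supersets_eq_filter (xs : List (List Int)) :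
    remove_supersets xs = xs.filter
      (fun s => ! xs.any (fun t => PySem.Set.issuperset s t && !PySem.Set.equal s t)) := by
  unfold remove_supersets
  rw [PySem.List.foldl_pyRange_zero_pyGetD' xs []
      (fun acc x => if (PySem.List.pyRange 0 (xs.length : Int) 1).any
          (fun i2 => PySem.Set.issuperset x (PySem.List.pyGetD xs i2 [])
            && !(PySem.Set.equal x (PySem.List.pyGetD xs i2 []))) then acc else acc ++ [x]) []]
  have h1 : (fun (acc : List (List Int)) (x : List Int) =>
        if (PySem.List.pyRange 0 (xs.length : Int) 1).any
            (fun i2 => PySem.Set.issuperset x (PySem.List.pyGetD xs i2 [])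
              && !(PySem.Set.equal x (PySem.List.pyGetD xs i2 []))) then acc else acc ++ [x])
      = fun acc x => if (! xs.any (fun t => PySem.Set.issuperset x t && !PySem.Set.equal x t)) = true
          then acc ++ [x] else acc := by
    funext acc x
    rw [any_pyRange_pyGetD xs (fun t => PySem.Set.issuperset x t && !PySem.Set.equal x t)]
    cases h : xs.any (fun t => PySem.Set.issuperset x t && !PySem.Set.equal x t) <;> simp
  rw [h1, PySem.List.foldl_append_if_eq_filter]
  simp

theorem proper_iff (t s : List Int) (ht : t.Nodup) (hs : s.Nodup) :
    (PySem.Set.issuperset s t && !PySem.Set.equal s t) = true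
      ↔ (t.length : Int) < (s.length : Int) ∧ PySem.Set.issubset t s = true := by
  constructor
  · intro h
    rw [Bool.and_eq_true, Bool.not_eq_true', PySem.Set.issuperset_iff] at h
    obtain ⟨hsub, hne⟩ := h
    have hsub' : PySem.Set.issubset t s = true := by
      rw [PySem.Set.issubset_iff]; exact hsub
    have hsp : List.Subperm t s := ht.subperm (fun x hx => hsub x hx)
    have hle : t.length ≤ s.length := hsp.length_le
    refine ⟨?_, hsub'⟩
    rcases lt_or_eq_of_le hle with hlt | heq
    · exact_mod_cast hlt
    · exfalso
      have hperm : List.Perm t s := hsp.perm_of_length_le (le_of_eq heq.symm)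
      have : PySem.Set.equal s t = true := by
        rw [PySem.Set.equal_iff]
        intro x
        exact ⟨fun hx => hperm.mem_iff.mpr hx, fun hx => hperm.mem_iff.mp hx⟩
      simp [this] at hne
  · intro ⟨hlt, hsub⟩
    rw [PySem.Set.issubset_iff] at hsub
    rw [Bool.and_eq_true, Bool.not_eq_true', PySem.Set.issuperset_iff]
    refine ⟨hsub, ?_⟩
    by_contra hne
    rw [Bool.not_eq_false, PySem.Set.equal_iff] at hne
    have hsub2 : s ⊆ t := fun x hx => (hne x).mp hx
    have hst : List.Subperm s t := hs.subperm hsub2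
    have : s.length ≤ t.length := hst.length_le
    omega

-- ===== VERDICT (by name: the statement is the Claim_ definition above) =====
theorem remove_supersets_spec : Claim_equal_remove_supersets := by
  intro l _ hpre
  unfold Spec_remove_supersets
  rw [remove_supersets_eq_filter, alt_eq_filter]
  apply List.filter_congr
  intro s hs
  have hnds := hpre s hs
  have hany : l.any (fun t => PySem.Set.issuperset s t && !PySem.Set.equal s t) = badB l s := by
    rw [Bool.eq_iff_iff, List.any_eq_true, badB_iff]
    constructor
    · rintro ⟨t, ht, hp⟩
      obtain ⟨hlt, hsub⟩ := (proper_iff t s (hpre t ht) hnds).mp hp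
      exact ⟨t, ht, hlt, (PySem.Set.issubset_iff t s).mp hsub⟩
    · rintro ⟨t, ht, hlt, hsub⟩
      exact ⟨t, ht, (proper_iff t s (hpre t ht) hnds).mpr ⟨hlt, (PySem.Set.issubset_iff t s).mpr hsub⟩⟩
  rw [hany]
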